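-- pv_equiv track=rewrite | github.com/PedroA-Gondim/Auditoria-e-Seguranca | src/main.py | combinar_seed
-- ===== SOURCE A (Python) =====
-- def combinar_seed(seed_bits_usuario, bits_tft):
--     """
--     Combina a senha do usuário com os dados do campeão usando XOR.
--
--     Processo:
--     1. Se tamanhos diferentes: expande o TFT repetindo-o para igualar tamanho
--     2. XOR cada bit: 1⊕1=0, 1⊕0=1, 0⊕1=1, 0⊕0=0
--
--     Efeito: dados do campeão/estrelas modificam a senha sem perder informação
--     Resultado: mesma senha + campeão diferente = chave completamente diferente
--     """
--     len_seed = len(seed_bits_usuario)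
--     len_tft = len(bits_tft)
--
--     if len_seed == 0:
--         return []
--
--     # Expande TFT para ter tamanho ≥ seed
--     fator_multiplicacao = (len_seed // len_tft) + 1
--     tft_extendido = (bits_tft * fator_multiplicacao)[:len_seed]
--
--     # XOR bit a bit
--     seed_combinada = [
--         b_seed ^ b_tft for b_seed, b_tft in zip(seed_bits_usuario, tft_extendido)
--     ]
--
--     return seed_combinada
-- ===== SOURCE B (Python) =====
-- def combinar_seed(seed_bits_usuario, bits_tft):
--     len_tft = len(bits_tft)
--     return [b ^ bits_tft[i % len_tft] for i, b in enumerate(seed_bits_usuario)]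
-- ===== Notes on version B (the rewrite author's own statement) =====
-- stated objective: idiomatic
-- what changed: B drops the materialized repeated-TFT list and the explicit empty-seed guard, XOR-ing each seed bit directly with bits_tft[i % len_tft] via modular indexing in one comprehension.
import Mathlib
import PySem

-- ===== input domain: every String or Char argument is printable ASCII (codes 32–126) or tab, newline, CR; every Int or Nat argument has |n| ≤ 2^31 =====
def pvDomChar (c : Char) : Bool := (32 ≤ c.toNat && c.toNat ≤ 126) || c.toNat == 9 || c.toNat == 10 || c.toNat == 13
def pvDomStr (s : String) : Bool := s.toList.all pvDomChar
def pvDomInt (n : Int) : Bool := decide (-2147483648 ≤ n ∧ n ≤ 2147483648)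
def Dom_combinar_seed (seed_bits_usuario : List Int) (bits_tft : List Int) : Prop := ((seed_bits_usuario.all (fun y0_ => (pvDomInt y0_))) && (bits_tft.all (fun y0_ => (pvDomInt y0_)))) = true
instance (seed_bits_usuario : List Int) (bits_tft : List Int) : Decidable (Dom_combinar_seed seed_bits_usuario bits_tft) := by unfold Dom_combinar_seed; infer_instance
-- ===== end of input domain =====

-- ===== PORT A =====
-- B replaces A's materialized repeated-TFT list and empty-seed guard by modular indexing in one comprehension (objective: idiomatic).
def combinar_seed (seed_bits_usuario : List Int) (bits_tft : List Int) : List Int :=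
  let len_seed := seed_bits_usuario.length
  let len_tft := bits_tft.length
  if len_seed = 0 then []
  else
    -- fator = len_seed // len_tft + 1 ; Python floor division of two nonnegatives = Nat division (len_tft ≠ 0 by Pre_)
    let fator := len_seed / len_tft + 1
    let tft_extendido := ((List.replicate fator bits_tft).flatten).take len_seed
    List.zipWith (fun b_seed b_tft => PySem.Int.bxor b_seed b_tft) seed_bits_usuario tft_extendido

-- ===== PORT B =====
def combinar_seed_alt (seed_bits_usuario : List Int) (bits_tft : List Int) : List Int :=
  let len_tft := bits_tft.length
  (PySem.List.enumerate seed_bits_usuario).map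
    (fun p => PySem.Int.bxor p.2 (PySem.List.pyGetD bits_tft (PySem.Int.mod p.1 (len_tft : Int)) 0))

-- ===== PRECONDITION & SPEC =====
-- Pre_ excludes a non-empty seed with empty bits_tft: there A raises ZeroDivisionError (len_seed // 0), and B raises the same (i % 0).
def Pre_combinar_seed (seed_bits_usuario : List Int) (bits_tft : List Int) : Prop :=
  seed_bits_usuario = [] ∨ bits_tft ≠ []
instance (seed_bits_usuario : List Int) (bits_tft : List Int) : Decidable (Pre_combinar_seed seed_bits_usuario bits_tft) := by unfold Pre_combinar_seed; infer_instance
def pvWitness_combinar_seed : List Int × List Int := ([1, 0, 1, 1, 0], [1, 0, 1])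
def Spec_combinar_seed (seed_bits_usuario : List Int) (bits_tft : List Int) (out : List Int) : Prop := out = combinar_seed_alt seed_bits_usuario bits_tft
instance (seed_bits_usuario : List Int) (bits_tft : List Int) (out : List Int) : Decidable (Spec_combinar_seed seed_bits_usuario bits_tft out) := by unfold Spec_combinar_seed; infer_instance

-- ===== CLAIM (what is proved, stated in full; the proofs are below) =====
def Claim_equal_combinar_seed : Prop := ∀ (seed_bits_usuario : List Int) (bits_tft : List Int), Dom_combinar_seed seed_bits_usuario bits_tft → Pre_combinar_seed seed_bits_usuario bits_tft → Spec_combinar_seed seed_bits_usuario bits_tft (combinar_seed seed_bits_usuario bits_tft)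

-- ===== LEMMAS AND PROOFS =====

-- the k-th element of bits_tft repeated f times is bits_tft[k % len]
lemma getElem_flatten_replicate {a : Type} (t : List a) (f k : Nat)
    (h : k < ((List.replicate f t).flatten).length) (ht : 0 < t.length) :
    ((List.replicate f t).flatten)[k] = t[k % t.length]'(Nat.mod_lt _ ht) := by
  induction f generalizing k with
  | zero => simp at h
  | succ n ih =>
    have hflat : (List.replicate (n+1) t).flatten = t ++ (List.replicate n t).flatten := by
      simp [List.replicate_succ]
    by_cases hk : k < t.length
    · have : k % t.length = k := Nat.mod_eq_of_lt hk
      simp [hflat, hk, this]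
    · rw [Nat.not_lt] at hk
      have hlen : k - t.length < ((List.replicate n t).flatten).length := by
        simp only [hflat, List.length_append] at h
        omega
      have hmod : (k - t.length) % t.length = k % t.length :=
        (Nat.mod_eq_sub_mod hk).symm
      have := ih (k - t.length) hlen
      simp only [hflat]
      rw [List.getElem_append_right (by omega), this]
      simp [hmod]

-- ===== VERDICT (by name: the statement is the Claim_ definition above) =====
theorem combinar_seed_spec : Claim_equal_combinar_seed := by
  intro s t _ hpre
  unfold Spec_combinar_seed combinar_seed combinar_seed_alt
  rcases hpre with hs | ht
  · subst hs; simp [PySem.List.enumerate]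
  · have htl : 0 < t.length := List.length_pos_iff.mpr ht
    by_cases hs0 : s.length = 0
    · simp [List.eq_nil_of_length_eq_zero hs0]
    · simp only [hs0, if_false]
      have hbound : s.length < (s.length / t.length + 1) * t.length := by
        have h1 := Nat.div_add_mod s.length t.length
        rw [Nat.mul_comm] at h1
        have h2 := Nat.mod_lt s.length htl
        rw [Nat.add_mul, Nat.one_mul]
        omega
      have hflatlen : ((List.replicate (s.length / t.length + 1) t).flatten).length
          = (s.length / t.length + 1) * t.length := by
        simp [List.length_flatten]
      apply List.ext_getElem
      · simp only [List.length_zipWith, List.length_take, hflatlen, List.length_map,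
          PySem.List.length_enumerate]
        omega
      · intro k h1 h2
        have hk : k < s.length := by
          simp only [List.length_zipWith, List.length_take, hflatlen] at h1
          omega
        have htake : k < s.length ⊓ ((List.replicate (s.length / t.length + 1) t).flatten).length := by
          simp [hflatlen]; omega
        rw [List.getElem_zipWith, List.getElem_take,
            getElem_flatten_replicate t _ _ (by omega) htl,
            List.getElem_map, PySem.List.getElem_enumerate]
        simp only [zero_add]
        rw [show PySem.Int.mod (k : Int) (t.length : Int) = ((k % t.length : Nat) : Int) from
              PySem.Int.mod_natCast k t.length]
        rw [PySem.List.pyGetD_natCast]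
        simp [List.getD, List.getElem?_eq_getElem (Nat.mod_lt _ htl)]
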